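-- pv_equiv track=rewrite | github.com/eth-lre/MWPTutor | model/utils.py | extend_floats
-- ===== SOURCE A (Python) =====
-- def extend_floats(nums):
--     ex=[]
--     for n in nums:
--         while "." in n and n[-1]=="0":
--             n=n[:-1]
--             if n[-1]==".":
--                 n=n[:-1]
--             ex.append(n)
--     return nums+ex
-- ===== SOURCE B (Python) =====
-- def _truncations(n):
--     if "." not in n:
--         return []
--     stripped = n.rstrip("0")
--     k = len(n) - len(stripped)
--     if k == 0:
--         return []
--     mids = [n[:-i] for i in range(1, k)]
--     if stripped.endswith("."):
--         rest = stripped[:-1]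
--         return mids + [rest] + _truncations(rest)
--     return mids + [stripped]
--
--
-- def extend_floats(nums):
--     ex = []
--     for n in nums:
--         ex.extend(_truncations(n))
--     return nums + ex
-- ===== Notes on version B (the rewrite author's own statement) =====
-- stated objective: alternative
-- what changed: A's while loop strips one trailing '0' per iteration, mutating the string and rechecking '.' membership each step; B instead recursively strips each whole trailing-zero run with rstrip('0') at once, emits the intermediate truncations by direct slicing of the unmodified string, and recurses only when the run reaches the decimal point.
import Mathlib
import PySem

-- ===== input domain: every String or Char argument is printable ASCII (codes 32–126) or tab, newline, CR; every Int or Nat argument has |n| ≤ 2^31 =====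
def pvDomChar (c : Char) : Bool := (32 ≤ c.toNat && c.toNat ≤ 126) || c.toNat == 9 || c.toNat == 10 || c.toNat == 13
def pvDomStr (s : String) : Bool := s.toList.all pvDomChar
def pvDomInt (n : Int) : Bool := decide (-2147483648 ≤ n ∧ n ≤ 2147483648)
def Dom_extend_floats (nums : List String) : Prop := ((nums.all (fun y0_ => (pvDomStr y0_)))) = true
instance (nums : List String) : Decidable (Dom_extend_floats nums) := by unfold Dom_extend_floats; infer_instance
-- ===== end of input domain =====

-- B replaces A's one-char-at-a-time while loop by a recursive decomposition that strips each
-- whole trailing-zero run with rstrip("0") and emits the truncations by direct slicing (objective: alternative).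

-- ===== PORT A =====
-- A's inner while loop: strips one trailing '0' per step, drops a bare trailing '.', appends each intermediate.
def aLoop (n : List Char) (ex : List String) : List String :=
  if h : '.' ∈ n ∧ n.getLast? = some '0' then
    let n1 := n.dropLast
    let n2 := if n1.getLast? = some '.' then n1.dropLast else n1
    aLoop n2 (ex ++ [String.ofList n2])
  else ex
termination_by n.length
decreasing_by
  have hne : n ≠ [] := List.ne_nil_of_mem h.1
  have hp : 0 < n.length := List.length_pos_iff.mpr hne
  show (if (n.dropLast).getLast? = some '.' then n.dropLast.dropLast else n.dropLast).length < n.length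
  split <;> simp [List.length_dropLast] <;> omega

def extend_floats (nums : List String) : List String :=
  nums ++ nums.foldl (fun ex n => aLoop n.toList ex) []

-- ===== PORT B =====
-- n.rstrip("0") ported exactly: drop the trailing run of '0' characters.
def rstrip0 (l : List Char) : List Char := (l.reverse.dropWhile (fun c => c == '0')).reverse

-- B's recursive helper _truncations; n[:-i] is ported as take (length - i), exact for 1 ≤ i ≤ len.
def bTrunc (l : List Char) : List String :=
  if '.' ∈ l then
    let stripped := rstrip0 l
    let k := l.length - stripped.length
    if k = 0 then []
    else
      let mids := (List.range (k - 1)).map (fun j => String.ofList (l.take (l.length - (j + 1))))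
      if stripped.getLast? = some '.' then
        let rest := stripped.dropLast
        mids ++ [String.ofList rest] ++ bTrunc rest
      else mids ++ [String.ofList stripped]
  else []
termination_by l.length
decreasing_by
  rename_i hdot hk
  have h1 : (rstrip0 l).length ≤ l.length := by
    simpa [rstrip0] using List.length_dropWhile_le (fun c => c == '0') l.reverse
  simp [List.length_dropLast]
  omega

def extend_floats_alt (nums : List String) : List String :=
  nums ++ nums.foldl (fun ex n => ex ++ bTrunc n.toList) []

-- ===== PRECONDITION & SPEC =====
def Spec_extend_floats (nums : List String) (out : List String) : Prop := out = extend_floats_alt nums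
instance (nums : List String) (out : List String) : Decidable (Spec_extend_floats nums out) := by unfold Spec_extend_floats; infer_instance

-- ===== CLAIM (what is proved, stated in full; the proofs are below) =====
def Claim_equal_extend_floats : Prop := ∀ (nums : List String), Dom_extend_floats nums → Spec_extend_floats nums (extend_floats nums)

-- ===== LEMMAS AND PROOFS =====

-- rstrip0 skips a trailing '0'
theorem rstrip0_last_zero (l : List Char) (h : l.getLast? = some '0') :
    rstrip0 l = rstrip0 l.dropLast := by
  obtain ⟨m, rfl⟩ := List.getLast?_eq_some_iff.mp h
  simp [rstrip0]

-- rstrip0 is the identity when the last char is not '0'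
theorem rstrip0_last_ne (l : List Char) (c : Char) (h : l.getLast? = some c) (hc : c ≠ '0') :
    rstrip0 l = l := by
  obtain ⟨m, rfl⟩ := List.getLast?_eq_some_iff.mp h
  simp [rstrip0, hc]

theorem rstrip0_len_le (l : List Char) : (rstrip0 l).length ≤ l.length := by
  simpa [rstrip0] using List.length_dropWhile_le (fun c => c == '0') l.reverse

-- the key step: one iteration of A's while loop corresponds to peeling the head of bTrunc
theorem bTrunc_step (l : List Char) (h1 : '.' ∈ l) (h2 : l.getLast? = some '0') :
    bTrunc l = (let n1 := l.dropLast
                let n2 := if n1.getLast? = some '.' then n1.dropLast else n1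
                String.ofList n2 :: bTrunc n2) := by
  obtain ⟨m, rfl⟩ := List.getLast?_eq_some_iff.mp h2
  have hm : '.' ∈ m := by
    rcases List.mem_append.mp h1 with h | h
    · exact h
    · simp at h
  have hmne : m ≠ [] := List.ne_nil_of_mem hm
  have hs : rstrip0 (m ++ ['0']) = rstrip0 m := by
    simpa using rstrip0_last_zero (m ++ ['0']) (by simp)
  have hdl : (m ++ ['0']).dropLast = m := by simp
  obtain ⟨c, hc⟩ : ∃ c, m.getLast? = some c := by
    cases hg : m.getLast? with
    | none => exact absurd (List.getLast?_eq_none_iff.mp hg) hmne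
    | some c => exact ⟨c, rfl⟩
  simp only [hdl]
  by_cases hcdot : c = '.'
  · -- last of m is '.', so exactly one zero is stripped and the dot goes too
    subst hcdot
    have hsm : rstrip0 m = m := rstrip0_last_ne m '.' hc (by decide)
    rw [bTrunc]
    simp [h1, hs, hsm, hc, List.take_append_of_le_length]
  · have hsm : rstrip0 m = rstrip0 m := rfl
    have hne2 : ¬ m.getLast? = some '.' := by simp [hc, hcdot]
    simp only [if_neg hne2]
    by_cases hc0 : c = '0'
    · -- more zeros remain: the zero run continues into m
      subst hc0
      have hsz : rstrip0 m = rstrip0 m.dropLast := rstrip0_last_zero m hc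
      have hk : (rstrip0 m).length ≤ m.length - 1 := by
        rw [hsz]
        have := rstrip0_len_le m.dropLast
        simpa [List.length_dropLast] using this
      have hmlen : 1 ≤ m.length := List.length_pos_iff.mpr hmne
      rw [bTrunc, bTrunc]
      simp only [h1, hm, if_pos, hs]
      have hkl : m.length + 1 - (rstrip0 m).length = (m.length - (rstrip0 m).length) + 1 := by omega
      have hk0 : ¬ (m.length - (rstrip0 m).length = 0) := by omega
      simp only [List.length_append, List.length_cons, List.length_nil, Nat.zero_add, hkl]
      simp only [Nat.add_sub_cancel]
      rw [if_neg (show ¬(m.length - (rstrip0 m).length + 1 = 0) by omega)]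
      have hkeq : m.length - (rstrip0 m).length = (m.length - (rstrip0 m).length - 1) + 1 := by omega
      have hmids : (List.range (m.length - (rstrip0 m).length)).map
            (fun j => String.ofList ((m ++ ['0']).take (m.length + 1 - (j + 1))))
          = String.ofList m ::
            (List.range (m.length - (rstrip0 m).length - 1)).map
              (fun j => String.ofList (m.take (m.length - (j + 1)))) := by
        rw [hkeq, List.range_succ_eq_map]
        simp only [List.map_cons, List.map_map]
        congr 1
        · have h0 : m.length + 1 - (0 + 1) = m.length := by omega
          rw [h0, List.take_append_of_le_length (le_refl _), List.take_length]
        · refine List.map_congr_left ?_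
          intro j hj
          have harith : m.length + 1 - (j + 1 + 1) = m.length - (j + 1) := by omega
          simp only [Function.comp, Nat.succ_eq_add_one, harith,
            List.take_append_of_le_length (Nat.sub_le _ _)]
      rw [hmids]
      split <;> simp
    · -- the run is a single zero: stripping it already ends the loop for m
      have hsm2 : rstrip0 m = m := rstrip0_last_ne m c hc hc0
      rw [bTrunc, bTrunc]
      simp [h1, hm, hs, hsm2, hne2]

theorem bTrunc_nil (l : List Char) (h : ¬('.' ∈ l ∧ l.getLast? = some '0')) :
    bTrunc l = [] := by
  by_cases hd : '.' ∈ l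
  · have hne : l ≠ [] := List.ne_nil_of_mem hd
    obtain ⟨c, hc⟩ : ∃ c, l.getLast? = some c := by
      cases hg : l.getLast? with
      | none => exact absurd (List.getLast?_eq_none_iff.mp hg) hne
      | some c => exact ⟨c, rfl⟩
    have hc0 : c ≠ '0' := by rintro rfl; exact h ⟨hd, hc⟩
    rw [bTrunc]
    simp [hd, rstrip0_last_ne l c hc hc0]
  · rw [bTrunc]; simp [hd]

theorem aLoop_eq (l : List Char) (ex : List String) : aLoop l ex = ex ++ bTrunc l := by
  induction l, ex using aLoop.induct with
  | case1 n ex h a b ih =>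
      rw [aLoop]
      simp only [dif_pos h]
      simp only [b, a, dite_eq_ite] at ih
      rw [ih, bTrunc_step n h.1 h.2]
      simp
  | case2 n ex h =>
      rw [aLoop]
      simp [h, bTrunc_nil n h]

theorem fold_eq (nums : List String) (ex : List String) :
    nums.foldl (fun ex n => aLoop n.toList ex) ex
      = nums.foldl (fun ex n => ex ++ bTrunc n.toList) ex := by
  have hf : (fun (ex : List String) (n : String) => aLoop n.toList ex)
      = fun ex n => ex ++ bTrunc n.toList := by
    funext ex n; exact aLoop_eq _ _
  rw [hf]

-- ===== VERDICT (by name: the statement is the Claim_ definition above) =====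
theorem extend_floats_spec : Claim_equal_extend_floats := by
  intro nums _
  unfold Spec_extend_floats extend_floats extend_floats_alt
  rw [fold_eq]
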